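-- pv_equiv track=rewrite | github.com/l-campos/Vign-re-Cypher | vignere.py | coletar_tamanhos_chave
-- ===== SOURCE A (Python) =====
-- from collections import defaultdict
--
-- MAX_KEY_CANDIDATES = 40
--
-- def coletar_tamanhos_chave(fatores):
--     """Encontra os fatores mais comuns"""
--     contagem_fatores = defaultdict(int)
--     for f in fatores:
--         contagem_fatores[f] += 1
--
--     if not contagem_fatores:
--         return []
--
--     max_contagem = max(contagem_fatores.values())
--     candidatos = [f for f, contagem in contagem_fatores.items() if contagem == max_contagem]
--     return sorted(candidatos, reverse=True)[:MAX_KEY_CANDIDATES]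
-- ===== SOURCE B (Python) =====
-- from collections import Counter
--
-- MAX_KEY_CANDIDATES = 40
--
-- def coletar_tamanhos_chave(fatores):
--     """Encontra os fatores mais comuns"""
--     contagem = Counter(fatores)
--     melhor = 0
--     res = []
--     for f in sorted(contagem, reverse=True):
--         c = contagem[f]
--         if c > melhor:
--             melhor = c
--             res = [f]
--         elif c == melhor:
--             res.append(f)
--     return res[:MAX_KEY_CANDIDATES]
-- ===== Notes on version B (the rewrite author's own statement) =====
-- stated objective: alternative
-- what changed: B sorts the distinct factors descending once and collects the tied most-frequent leaders in a single running-argmax pass, instead of A's separate max() scan, filter comprehension, and second sort of the candidate subset.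
import Mathlib
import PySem

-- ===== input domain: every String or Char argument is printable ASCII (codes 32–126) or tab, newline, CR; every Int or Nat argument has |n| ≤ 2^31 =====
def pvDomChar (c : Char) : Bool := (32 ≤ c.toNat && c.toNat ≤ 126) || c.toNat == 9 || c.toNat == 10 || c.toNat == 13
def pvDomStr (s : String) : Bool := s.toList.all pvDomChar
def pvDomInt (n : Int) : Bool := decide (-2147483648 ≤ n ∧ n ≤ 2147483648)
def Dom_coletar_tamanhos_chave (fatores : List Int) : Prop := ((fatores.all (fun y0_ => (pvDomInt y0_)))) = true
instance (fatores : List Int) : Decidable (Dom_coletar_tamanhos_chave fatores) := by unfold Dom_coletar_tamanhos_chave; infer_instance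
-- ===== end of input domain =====

-- B replaces A's max()-scan + filter + sort-of-subset by one sort of the distinct factors
-- descending and a single running-argmax pass collecting the tied leaders (objective: alternative).


-- ===== PORT A =====
def coletar_tamanhos_chave (fatores : List Int) : List Int :=
  let contagem_fatores : PySem.Dict Int Int :=
    fatores.foldl (fun d f => d.modify f 0 (· + 1)) PySem.Dict.empty
  if contagem_fatores.items.isEmpty then []
  else
    match PySem.List.max? contagem_fatores.values (fun v => v) with
    | none => []   -- unreachable: values nonempty here (Python's max would raise only on empty)
    | some max_contagem =>
      let candidatos :=
        (contagem_fatores.items.filter (fun p => p.2 == max_contagem)).map (·.1)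
      (PySem.List.sorted candidatos (fun x => x) true).take 40

-- ===== PORT B =====
def coletar_tamanhos_chave_alt (fatores : List Int) : List Int :=
  let contagem := PySem.Dict.counter fatores
  let r :=
    (PySem.List.sorted contagem.keys (fun x => x) true).foldl
      (fun (s : Int × List Int) f =>
        let c := contagem.getD f 0
        if c > s.1 then (c, [f])
        else if c == s.1 then (s.1, s.2 ++ [f])
        else s)
      (0, [])
  r.2.take 40

-- ===== PRECONDITION & SPEC =====
def Spec_coletar_tamanhos_chave (fatores : List Int) (out : List Int) : Prop := out = coletar_tamanhos_chave_alt fatores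
instance (fatores : List Int) (out : List Int) : Decidable (Spec_coletar_tamanhos_chave fatores out) := by unfold Spec_coletar_tamanhos_chave; infer_instance

-- ===== CLAIM (what is proved, stated in full; the proofs are below) =====
def Claim_equal_coletar_tamanhos_chave : Prop := ∀ (fatores : List Int), Dom_coletar_tamanhos_chave fatores → Spec_coletar_tamanhos_chave fatores (coletar_tamanhos_chave fatores)

-- ===== LEMMAS AND PROOFS =====

-- B's running-argmax loop, characterised: it computes the running max of g and the
-- (order-preserving) filter of the elements achieving it.
theorem pv_foldl_step (g : Int → Int) (ks : List Int) (b : Int) (acc : List Int) :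
    ks.foldl
      (fun (s : Int × List Int) f =>
        if g f > s.1 then (g f, [f])
        else if g f == s.1 then (s.1, s.2 ++ [f])
        else s)
      (b, acc)
    = (ks.foldl (fun a k => max a (g k)) b,
       (if ks.foldl (fun a k => max a (g k)) b = b then acc else [])
         ++ ks.filter (fun k => g k == ks.foldl (fun a k => max a (g k)) b)) := by
  induction ks generalizing b acc with
  | nil => simp
  | cons k t ih =>
    simp only [List.foldl_cons]
    by_cases h1 : g k > b
    · rw [if_pos h1, ih]
      have hm : max b (g k) = g k := by omega
      simp only [hm]
      have hmax := PySem.List.le_foldl_max_int t g (g k)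
      have hne : t.foldl (fun a k => max a (g k)) (g k) ≠ b := by omega
      rw [if_neg hne, List.filter_cons]
      by_cases h2 : t.foldl (fun a k => max a (g k)) (g k) = g k
      · simp [h2]
      · have hb : (g k == t.foldl (fun a k => max a (g k)) (g k)) = false := by
          rw [beq_eq_false_iff_ne]; omega
        simp [h2, hb]
    · rw [if_neg h1]
      by_cases h2 : g k = b
      · simp only [h2, beq_self_eq_true, if_true, max_self, List.filter_cons]
        rw [ih]
        by_cases h3 : t.foldl (fun a k => max a (g k)) b = b
        · simp [h3]
        · have hb : (b == t.foldl (fun a k => max a (g k)) b) = false := by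
            rw [beq_eq_false_iff_ne]; omega
          simp [h3, hb]
      · have hbne : (g k == b) = false := by rw [beq_eq_false_iff_ne]; omega
        rw [hbne]
        simp only [Bool.false_eq_true, if_false]
        rw [ih]
        have hm : max b (g k) = b := by omega
        simp only [hm, List.filter_cons]
        have hmax := PySem.List.le_foldl_max_int t g b
        have hb : (g k == t.foldl (fun a k => max a (g k)) b) = false := by
          rw [beq_eq_false_iff_ne]; omega
        simp [hb]

-- an upper bound for the running max
theorem pv_foldl_max_le (g : Int → Int) (ks : List Int) (b c : Int)
    (hb : b ≤ c) (h : ∀ k ∈ ks, g k ≤ c) :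
    ks.foldl (fun a k => max a (g k)) b ≤ c := by
  induction ks generalizing b with
  | nil => exact hb
  | cons k t ih =>
    simp only [List.foldl_cons]
    exact ih _ (by have := h k (by simp); omega) (fun x hx => h x (by simp [hx]))

-- sorted-descending of distinct elements is strictly decreasing
theorem pv_sorted_rev_pairwise_gt (xs : List Int) (h : xs.Nodup) :
    (PySem.List.sorted xs (fun x => x) true).Pairwise (· > ·) := by
  have h1 := PySem.List.sorted_pairwise_rev xs (fun x => x)
  have h2 : (PySem.List.sorted xs (fun x => x) true).Nodup :=
    (PySem.List.sorted_perm xs (fun x => x) true).nodup_iff.mpr h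
  have := h1.and (List.Pairwise.imp (fun hne => hne) h2)
  exact this.imp (fun ⟨hle, hne⟩ => lt_of_le_of_ne hle (Ne.symm hne))

theorem coletar_tamanhos_chave_eq (fatores : List Int) :
    coletar_tamanhos_chave fatores = coletar_tamanhos_chave_alt fatores := by
  unfold coletar_tamanhos_chave coletar_tamanhos_chave_alt
  rw [← PySem.Dict.counter_eq_foldl]
  set d := PySem.Dict.counter fatores with hd
  set g : Int → Int := fun k => (fatores.count k : Int) with hg
  set S : List Int := PySem.Set.ofList fatores with hS
  have hitems : d.items = S.map (fun k => (k, g k)) := by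
    rw [hd, PySem.Dict.items_counter]
  have hkeys : d.keys = S := by rw [hd, PySem.Dict.keys_counter]
  have hSnodup : S.Nodup := PySem.Set.nodup_ofList fatores
  set L : List Int := PySem.List.sorted S (fun x => x) true with hL
  have hLperm : L.Perm S := PySem.List.sorted_perm S (fun x => x) true
  have hLgt : L.Pairwise (· > ·) := pv_sorted_rev_pairwise_gt S hSnodup
  have hgetD : ∀ f, d.getD f 0 = g f := fun f => by
    rw [hd, PySem.Dict.getD_counter]
  -- rewrite B's side via the loop characterisation
  have hB :
      ((PySem.List.sorted d.keys (fun x => x) true).foldl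
        (fun (s : Int × List Int) f =>
          let c := d.getD f 0
          if c > s.1 then (c, [f])
          else if c == s.1 then (s.1, s.2 ++ [f])
          else s)
        (0, [])).2
      = L.filter (fun k => g k == L.foldl (fun a k => max a (g k)) 0) := by
    rw [hkeys, ← hL]
    have hfun :
        (fun (s : Int × List Int) f =>
          let c := d.getD f 0
          if c > s.1 then (c, [f])
          else if c == s.1 then (s.1, s.2 ++ [f])
          else s)
        = (fun (s : Int × List Int) f =>
          if g f > s.1 then (g f, [f])
          else if g f == s.1 then (s.1, s.2 ++ [f])
          else s) := by
      funext s f; simp only [hgetD]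
    rw [hfun, pv_foldl_step g L 0 []]
    simp
  simp only [hB]
  by_cases hnil : fatores = []
  · subst hnil
    have hLnil : L = [] := by
      rw [hL, PySem.List.sorted_eq_nil_iff]
      rfl
    simp [hLnil, hitems, hS]
  · -- nonempty case
    set M : Int := L.foldl (fun a k => max a (g k)) 0 with hM
    have hSne : S ≠ [] := by
      rw [hS]
      intro hcon
      rcases List.exists_mem_of_ne_nil fatores hnil with ⟨x, hx⟩
      have : x ∈ PySem.Set.ofList fatores := (PySem.Set.mem_ofList fatores x).mpr hx
      rw [hcon] at this; exact absurd this (List.not_mem_nil)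
    have hitemsne : ¬ d.items.isEmpty = true := by
      rw [hitems]
      simpa [List.isEmpty_iff] using hSne
    rw [if_neg hitemsne]
    have hvalues : d.values = S.map g := by
      rw [PySem.Dict.values, hitems, List.map_map]
      rfl
    obtain ⟨s0, S', hScons⟩ := List.exists_cons_of_ne_nil hSne
    have hvcons : d.values = g s0 :: (S'.map g) := by
      rw [hvalues, hScons, List.map_cons]
    simp only [hvcons, PySem.List.max?_id_cons]
    set m : Int := (S'.map g).foldl max (g s0) with hm
    have hub := PySem.List.le_foldl_max (S'.map g) (g s0)
    have hmem : m = g s0 ∨ m ∈ S'.map g := PySem.List.foldl_max_mem (S'.map g) (g s0)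
    have hMm : M = m := by
      obtain ⟨k, hkS, hkm⟩ : ∃ k, k ∈ S ∧ g k = m := by
        rcases hmem with h | h
        · exact ⟨s0, by rw [hScons]; simp, h.symm⟩
        · rcases List.mem_map.mp h with ⟨k, hk, hkm⟩
          exact ⟨k, by rw [hScons]; simp [hk], hkm⟩
      have hkL : k ∈ L := hLperm.mem_iff.mpr hkS
      have h1 : m ≤ M := by
        rw [hM]
        have := (PySem.List.le_foldl_max_int L g 0).2 k hkL
        omega
      have h2 : M ≤ m := by
        rw [hM]
        apply pv_foldl_max_le
        · rw [← hkm, hg]; positivity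
        · intro x hxL
          have hxS : x ∈ S := hLperm.mem_iff.mp hxL
          rw [hScons] at hxS
          rcases List.mem_cons.mp hxS with h | h
          · subst h; exact hub.1
          · exact hub.2 (g x) (List.mem_map.mpr ⟨x, h, rfl⟩)
      omega
    rw [← hMm]
    have hcand :
        (d.items.filter (fun p => p.2 == M)).map (·.1)
        = S.filter (fun k => g k == M) := by
      rw [hitems]
      simp [List.filter_map, Function.comp_def]
    rw [hcand]
    have hfinal :
        PySem.List.sorted (S.filter (fun k => g k == M)) (fun x => x) true
        = L.filter (fun k => g k == M) := by
      apply PySem.List.sorted_rev_eq_of_perm_of_pairwise_gt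
      · exact hLperm.filter _
      · exact List.Pairwise.sublist List.filter_sublist hLgt
    rw [hfinal]

-- ===== VERDICT (by name: the statement is the Claim_ definition above) =====
theorem coletar_tamanhos_chave_spec : Claim_equal_coletar_tamanhos_chave := by
  intro fatores _
  unfold Spec_coletar_tamanhos_chave
  exact coletar_tamanhos_chave_eq fatores
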